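-- pv_equiv track=rewrite | github.com/HoangcoderIkci/NewCodes | toanroirac/python/thang3/1903/fureConversionCoefficient.py | calcCoefficentsFourier
-- ===== SOURCE A (Python) =====
-- def calcCoefficentsFourier(trustable,supTable):
--     coefficients = []
--     arrNotNullIndex = []
--     for id1 in range(len(trustable)):
--         if trustable[id1]:
--             arrNotNullIndex.append(id1)
--     for id1 in range(len(trustable)):
--         c = 0
--         for col in arrNotNullIndex:
--             c+= supTable[id1][col]
--         coefficients.append(c)
--     return coefficients
-- ===== SOURCE B (Python) =====
-- def calcCoefficentsFourier(trustable, supTable):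
--     # Column-major scatter: keep an accumulator vector and add each trusted
--     # column of supTable into it, instead of gathering a scalar sum per row.
--     n = len(trustable)
--     coefficients = [0] * n
--     for j in range(n):
--         if trustable[j]:
--             coefficients = [coefficients[i] + supTable[i][j] for i in range(n)]
--     return coefficients
-- ===== Notes on version B (the rewrite author's own statement) =====
-- stated objective: alternative
-- what changed: Replaces the gather scheme (precompute trusted indices, then per row sum a scalar over them) by a column-major scatter that keeps an accumulator vector and folds each trusted column into it; no index list is materialized.
-- outside the precondition, e.g. on calcCoefficentsFourier([True, True], [[1, 2]]): A raises IndexError, B raises IndexError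
import Mathlib
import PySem

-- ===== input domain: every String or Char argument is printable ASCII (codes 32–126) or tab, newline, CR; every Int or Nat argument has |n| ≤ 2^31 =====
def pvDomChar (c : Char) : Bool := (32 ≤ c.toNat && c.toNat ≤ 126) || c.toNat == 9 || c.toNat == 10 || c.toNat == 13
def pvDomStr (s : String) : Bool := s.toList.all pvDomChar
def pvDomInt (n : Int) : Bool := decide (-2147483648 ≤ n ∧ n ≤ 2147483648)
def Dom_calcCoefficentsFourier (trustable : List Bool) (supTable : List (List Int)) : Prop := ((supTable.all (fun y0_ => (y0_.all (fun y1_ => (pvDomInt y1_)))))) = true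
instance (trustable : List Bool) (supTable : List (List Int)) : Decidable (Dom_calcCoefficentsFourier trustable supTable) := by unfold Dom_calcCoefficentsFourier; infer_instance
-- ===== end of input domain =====

-- ===== PORT A =====
-- B replaces A's gather scheme (trusted-index list + per-row scalar sum) with a
-- column-major scatter over an accumulator vector; return values agree on Pre_.
def calcCoefficentsFourier (trustable : List Bool) (supTable : List (List Int)) : List Int :=
  let arrNotNullIndex : List Int :=
    (PySem.List.pyRange 0 (trustable.length : Int) 1).foldl
      (fun arr id1 => if PySem.List.pyGetD trustable id1 false then arr ++ [id1] else arr) []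
  (PySem.List.pyRange 0 (trustable.length : Int) 1).foldl
    (fun coefficients id1 =>
      coefficients ++
        [arrNotNullIndex.foldl
          (fun c col => c + PySem.List.pyGetD (PySem.List.pyGetD supTable id1 []) col 0) 0])
    []

-- ===== PORT B =====
def calcCoefficentsFourier_alt (trustable : List Bool) (supTable : List (List Int)) : List Int :=
  let n : Int := trustable.length
  (PySem.List.pyRange 0 n 1).foldl
    (fun coefficients j =>
      if PySem.List.pyGetD trustable j false then
        (PySem.List.pyRange 0 n 1).map
          (fun i => PySem.List.pyGetD coefficients i 0
            + PySem.List.pyGetD (PySem.List.pyGetD supTable i []) j 0)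
      else coefficients)
    (List.replicate trustable.length 0)

-- ===== PRECONDITION & SPEC =====
-- Pre_ excludes exactly the inputs where A raises IndexError: some trusted column j
-- exists while some row i < len(trustable) is missing from supTable or shorter than j+1.
def Pre_calcCoefficentsFourier (trustable : List Bool) (supTable : List (List Int)) : Prop :=
  ∀ j < trustable.length, trustable.getD j false = true →
    trustable.length ≤ supTable.length ∧
    ∀ i < trustable.length, j < (supTable.getD i []).length
instance (trustable : List Bool) (supTable : List (List Int)) : Decidable (Pre_calcCoefficentsFourier trustable supTable) := by unfold Pre_calcCoefficentsFourier; infer_instance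
def pvWitness_calcCoefficentsFourier : List Bool × List (List Int) := ([true, false], [[3, 4], [5, 6]])
def Spec_calcCoefficentsFourier (trustable : List Bool) (supTable : List (List Int)) (out : List Int) : Prop := out = calcCoefficentsFourier_alt trustable supTable
instance (trustable : List Bool) (supTable : List (List Int)) (out : List Int) : Decidable (Spec_calcCoefficentsFourier trustable supTable out) := by unfold Spec_calcCoefficentsFourier; infer_instance

-- ===== CLAIM (what is proved, stated in full; the proofs are below) =====
def Claim_equal_calcCoefficentsFourier : Prop := ∀ (trustable : List Bool) (supTable : List (List Int)), Dom_calcCoefficentsFourier trustable supTable → Pre_calcCoefficentsFourier trustable supTable → Spec_calcCoefficentsFourier trustable supTable (calcCoefficentsFourier trustable supTable)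

-- ===== LEMMAS AND PROOFS =====
-- Scatter invariant: folding B's column-update step over any list of candidate
-- columns, starting from a vector of the form R.map g, yields per-row folds.
theorem pv_scatter (n : Nat) (P : Int → Bool) (f : Int → Int → Int)
    (js : List Int) (g : Int → Int) :
    js.foldl
      (fun coefficients j =>
        if P j then
          (PySem.List.pyRange 0 (n : Int) 1).map
            (fun i => PySem.List.pyGetD coefficients i 0 + f i j)
        else coefficients)
      ((PySem.List.pyRange 0 (n : Int) 1).map g)
    = (PySem.List.pyRange 0 (n : Int) 1).map
        (fun i => (js.filter P).foldl (fun c j => c + f i j) (g i)) := by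
  induction js generalizing g with
  | nil => simp
  | cons j js ih =>
    simp only [List.foldl_cons, List.filter_cons]
    by_cases hP : P j
    · have hmap :
        (PySem.List.pyRange 0 (n : Int) 1).map
          (fun i => PySem.List.pyGetD ((PySem.List.pyRange 0 (n : Int) 1).map g) i 0 + f i j)
        = (PySem.List.pyRange 0 (n : Int) 1).map (fun i => g i + f i j) := by
        apply List.map_congr_left
        intro i hi
        rcases (PySem.List.mem_pyRange_one).1 hi with ⟨h0, hn⟩
        rw [PySem.List.pyGetD_map_pyRange_of_nonneg g n i 0 h0 hn]
      rw [if_pos hP, hmap, ih]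
      simp [hP]
    · rw [if_neg hP, ih]
      simp [hP]

theorem pv_replicate_eq_map (n : Nat) :
    (List.replicate n (0 : Int)) = (PySem.List.pyRange 0 (n : Int) 1).map (fun _ => 0) := by
  have h : ((PySem.List.pyRange 0 (n : Int) 1).map (fun _ => (0 : Int)))
      = List.replicate (PySem.List.pyRange 0 (n : Int) 1).length 0 := List.map_const'
  have hl : (PySem.List.pyRange 0 (n : Int) 1).length = n := by
    rw [PySem.List.length_pyRange_one]; simp
  rw [h, hl]

-- ===== VERDICT (by name: the statement is the Claim_ definition above) =====
theorem calcCoefficentsFourier_spec : Claim_equal_calcCoefficentsFourier := by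
  intro trustable supTable _ _
  unfold Spec_calcCoefficentsFourier calcCoefficentsFourier calcCoefficentsFourier_alt
  rw [PySem.List.foldl_append_if_eq_filter, PySem.List.foldl_append_singleton_eq_map,
    pv_replicate_eq_map, pv_scatter]
  simp
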